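-- pv_equiv track=rewrite | github.com/eunjijeon11/review_classifier | functions.py | bow_and_dict
-- ===== SOURCE A (Python) =====
-- def bow_and_dict(review):
--     bow = []
--     dict = {}
--
--     for word in review:
--         if word in dict:
--             bow[dict[word]] = bow[dict[word]] + 1
--         else:
--             dict[word] = len(bow)
--             bow.append(1)
--
--     return bow, dict
-- ===== SOURCE B (Python) =====
-- from collections import Counter
--
-- def bow_and_dict(review):
--     words = list(review)
--     order = list(dict.fromkeys(words))
--     counts = Counter(words)
--     return [counts[w] for w in order], {w: i for i, w in enumerate(order)}
-- ===== Notes on version B (the rewrite author's own statement) =====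
-- stated objective: idiomatic
-- what changed: B replaces A's single incremental loop (growing bow in place and mutating indices) by three staged whole-list passes: dict.fromkeys for first-occurrence order, Counter for frequencies, then two comprehensions assembling the count list and the word-to-index dict.
import Mathlib
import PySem

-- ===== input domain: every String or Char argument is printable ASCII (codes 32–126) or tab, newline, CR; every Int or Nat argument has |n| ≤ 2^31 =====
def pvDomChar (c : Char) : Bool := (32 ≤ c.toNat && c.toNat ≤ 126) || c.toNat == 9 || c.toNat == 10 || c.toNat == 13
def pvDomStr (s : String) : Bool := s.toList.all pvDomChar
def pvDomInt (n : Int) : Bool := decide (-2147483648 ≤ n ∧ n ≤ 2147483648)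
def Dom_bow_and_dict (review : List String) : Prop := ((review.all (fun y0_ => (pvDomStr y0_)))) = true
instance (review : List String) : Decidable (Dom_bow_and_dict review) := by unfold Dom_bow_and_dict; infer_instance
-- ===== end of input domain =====

-- B replaces A's single incremental loop by staged whole-list passes: ordered dedup, Counter,
-- then two comprehensions assembling the count list and the word→index dict (objective: more idiomatic).

-- ===== PORT A =====
def bow_and_dict (review : List String) : List Int × (List (String × Int)) :=
  let st := review.foldl
    (fun (st : List Int × PySem.Dict String Int) word =>
      if st.2.contains word then
        (PySem.List.pySetD st.1 (st.2.getD word 0)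
          (PySem.List.pyGetD st.1 (st.2.getD word 0) 0 + 1), st.2)
      else
        (st.1 ++ [1], st.2.insert word (PySem.List.len st.1)))
    (([] : List Int), (PySem.Dict.empty : PySem.Dict String Int))
  (st.1, st.2.items)

-- ===== PORT B =====
def bow_and_dict_alt (review : List String) : List Int × (List (String × Int)) :=
  let words := review
  let order := PySem.List.dedup words
  let counts := PySem.Dict.counter words
  (order.map (fun w => counts.getD w 0),
   ((PySem.List.enumerate order 0).foldl
      (fun (d : PySem.Dict String Int) q => d.insert q.2 q.1)
      PySem.Dict.empty).items)

-- ===== PRECONDITION & SPEC =====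
def Spec_bow_and_dict (review : List String) (out : List Int × (List (String × Int))) : Prop := out = bow_and_dict_alt review
instance (review : List String) (out : List Int × (List (String × Int))) : Decidable (Spec_bow_and_dict review out) := by unfold Spec_bow_and_dict; infer_instance

-- ===== CLAIM (what is proved, stated in full; the proofs are below) =====
def Claim_equal_bow_and_dict : Prop := ∀ (review : List String), Dom_bow_and_dict review → Spec_bow_and_dict review (bow_and_dict review)

-- ===== LEMMAS AND PROOFS =====

-- the dict A's loop builds: first-occurrence-distinct words paired with their indices
def pvPairs (p : List String) : List (String × Int) :=
  (PySem.Set.ofList p).zipIdx.map (fun q => (q.1, (q.2 : Int)))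

def pvDict (p : List String) : PySem.Dict String Int := PySem.Dict.mk (pvPairs p)

-- the bag-of-words A builds: per distinct word, its count so far
def pvBow (p : List String) : List Int :=
  (PySem.Set.ofList p).map (fun w => (p.count w : Int))

lemma keys_pvDict (p : List String) : (pvDict p).keys = PySem.Set.ofList p := by
  simp [pvDict, pvPairs, PySem.Dict.keys_mk, List.map_map, Function.comp_def]

lemma contains_pvDict (p : List String) (w : String) :
    (pvDict p).contains w = decide (w ∈ PySem.Set.ofList p) := by
  rw [PySem.Dict.contains_eq_decide_mem_keys, keys_pvDict]

lemma getD_pvDict (p : List String) (w : String) (i : Nat)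
    (hi : i < (PySem.Set.ofList p).length) (hw : (PySem.Set.ofList p)[i] = w) :
    (pvDict p).getD w 0 = (i : Int) := by
  have hmem : (w, (i : Int)) ∈ pvPairs p := by
    have h1 : ((PySem.Set.ofList p)[i], i) ∈ (PySem.Set.ofList p).zipIdx := by
      have := List.getElem_mem (l := (PySem.Set.ofList p).zipIdx) (n := i)
        (by simpa using hi)
      simpa [List.getElem_zipIdx] using this
    rw [hw] at h1
    exact List.mem_map_of_mem h1
  have hnd : (pvDict p).keys.Nodup := by
    rw [keys_pvDict]; exact PySem.Set.nodup_ofList p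
  exact PySem.Dict.getD_of_mem_items (pvDict p) hmem hnd 0

lemma length_pvBow (p : List String) : (pvBow p).length = (PySem.Set.ofList p).length := by
  simp [pvBow]

lemma pv_bump (l p : List String) (w : String) (hnd : l.Nodup) (i : Nat)
    (hi : i < l.length) (hw : l[i] = w) :
    (l.map (fun v => (p.count v : Int))).set i ((p.count w : Int) + 1)
      = l.map (fun v => ((p ++ [w]).count v : Int)) := by
  apply List.ext_getElem
  · simp
  · intro j h1 h2
    have hj' : j < l.length := by simpa using h2
    rw [List.getElem_set]
    by_cases hj : i = j
    · subst hj
      rw [if_pos rfl, List.getElem_map, hw, List.count_append]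
      simp
    · rw [if_neg hj, List.getElem_map, List.getElem_map, List.count_append]
      have hne : l[j] ≠ w := by
        intro h
        exact hj (((List.Nodup.getElem_inj_iff hnd).mp (by rw [hw, h])).symm)
      simp [Ne.symm hne]

lemma pvPairs_append_of_not_mem (p : List String) (w : String)
    (hw : w ∉ PySem.Set.ofList p) :
    pvPairs (p ++ [w]) = pvPairs p ++ [(w, ((PySem.Set.ofList p).length : Int))] := by
  rw [pvPairs, PySem.Set.ofList_append_singleton, PySem.Set.add_of_not_mem hw]
  simp [pvPairs, List.zipIdx_append]

lemma pvDict_step (p : List String) (w : String) (hw : w ∉ PySem.Set.ofList p)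
    (bow : List Int) (hlen : bow.length = (PySem.Set.ofList p).length) :
    (pvDict p).insert w (PySem.List.len bow) = pvDict (p ++ [w]) := by
  apply PySem.Dict.ext
  rw [PySem.Dict.items_insert_of_not_contains (pvDict p) (PySem.List.len bow)
    (by rw [contains_pvDict]; simpa using hw)]
  show pvPairs p ++ [(w, PySem.List.len bow)] = (pvDict (p ++ [w])).items
  rw [show (pvDict (p ++ [w])).items = pvPairs (p ++ [w]) from rfl,
    pvPairs_append_of_not_mem p w hw]
  simp [PySem.List.len_eq, hlen]

-- counts of the old distinct words are unchanged by appending a new word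
lemma pv_map_count_frozen (p : List String) (w : String) (hw : w ∉ PySem.Set.ofList p) :
    (PySem.Set.ofList p).map (fun v => ((p ++ [w]).count v : Int)) = pvBow p := by
  rw [pvBow]
  apply List.map_congr_left
  intro v hv
  have hvw : w ≠ v := fun h => hw (h ▸ hv)
  rw [List.count_append]
  simp [hvw]

-- characterisation of A's loop
lemma foldA (p : List String) :
    p.foldl
      (fun (st : List Int × PySem.Dict String Int) word =>
        if st.2.contains word then
          (PySem.List.pySetD st.1 (st.2.getD word 0)
            (PySem.List.pyGetD st.1 (st.2.getD word 0) 0 + 1), st.2)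
        else
          (st.1 ++ [1], st.2.insert word (PySem.List.len st.1)))
      (([] : List Int), (PySem.Dict.empty : PySem.Dict String Int))
    = (pvBow p, pvDict p) := by
  induction p using List.reverseRecOn with
  | nil => rfl
  | append_singleton p w ih =>
    rw [List.foldl_append, ih, List.foldl_cons, List.foldl_nil]
    by_cases hw : w ∈ PySem.Set.ofList p
    · obtain ⟨i, hi, hget⟩ := List.getElem_of_mem hw
      have hc : (pvDict p).contains w = true := by
        rw [contains_pvDict]; simpa using hw
      have hset : PySem.Set.ofList (p ++ [w]) = PySem.Set.ofList p := by
        rw [PySem.Set.ofList_append_singleton, PySem.Set.add_of_mem hw]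
      have hgetd : (pvBow p).getD i 0 = (p.count w : Int) := by
        rw [pvBow, List.getD_eq_getElem?_getD, List.getElem?_map,
          List.getElem?_eq_getElem hi, hget]
        rfl
      rw [if_pos hc, getD_pvDict p w i hi hget]
      simp only [PySem.List.pySetD_natCast, PySem.List.pyGetD_natCast, hgetd]
      refine Prod.ext ?_ ?_
      · rw [show pvBow (p ++ [w])
            = (PySem.Set.ofList p).map (fun v => ((p ++ [w]).count v : Int)) from by
          rw [pvBow, hset]]
        exact pv_bump _ p w (PySem.Set.nodup_ofList p) i hi hget
      · simp [pvDict, pvPairs, hset]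
    · have hc : (pvDict p).contains w = false := by
        rw [contains_pvDict]; simpa using hw
      have hwp : w ∉ p := fun h => hw ((PySem.Set.mem_ofList p w).mpr h)
      rw [if_neg (by rw [hc]; exact Bool.false_ne_true)]
      refine Prod.ext ?_ (pvDict_step p w hw _ (length_pvBow p))
      rw [show pvBow (p ++ [w])
          = (PySem.Set.ofList p ++ [w]).map (fun v => ((p ++ [w]).count v : Int)) from by
        rw [pvBow, PySem.Set.ofList_append_singleton, PySem.Set.add_of_not_mem hw]]
      rw [List.map_append, pv_map_count_frozen p w hw]
      simp [List.count_append, List.count_eq_zero_of_not_mem hwp]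

-- B's dict comprehension over enumerate yields exactly pvPairs
lemma foldB_dict (p : List String) :
    ((PySem.List.enumerate (PySem.List.dedup p) 0).foldl
      (fun (d : PySem.Dict String Int) q => d.insert q.2 q.1)
      PySem.Dict.empty).items = pvPairs p := by
  have hfresh : ∀ q ∈ PySem.List.enumerate (PySem.List.dedup p) 0,
      (PySem.Dict.empty : PySem.Dict String Int).contains q.2 = false := by
    intro q _; exact PySem.Dict.contains_empty q.2
  have hnd : ((PySem.List.enumerate (PySem.List.dedup p) 0).map (·.2)).Nodup := by
    rw [PySem.List.map_snd_enumerate]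
    simpa using PySem.Set.nodup_ofList p
  rw [PySem.Dict.items_foldl_insert_fresh _ _ _ _ hfresh hnd, show (PySem.Dict.empty : PySem.Dict String Int).items = [] from rfl, List.nil_append, pvPairs,
    PySem.List.enumerate_eq_zipIdx_map]
  simp [List.map_map, Function.comp_def]

-- ===== VERDICT (by name: the statement is the Claim_ definition above) =====
theorem bow_and_dict_spec : Claim_equal_bow_and_dict := by
  intro review _
  unfold Spec_bow_and_dict bow_and_dict bow_and_dict_alt
  simp only []
  rw [foldA, foldB_dict]
  refine Prod.ext ?_ rfl
  show pvBow review = _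
  rw [pvBow]
  simp only [PySem.List.dedup_eq_ofList]
  exact List.map_congr_left (fun w _ => by rw [PySem.Dict.getD_counter])
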